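-- pv_equiv track=rewrite | github.com/BQSKit/bqskit | utils/test/types.py | _split_generic_arguments
-- ===== SOURCE A (Python) =====
-- def _split_generic_arguments(args: str) -> list[str]:
--     """Split a generic's type arguments up."""
--     comma_indices = []
--     num_open_brackets = 0
--     for i, char in enumerate(args):
--         if char == '[':
--             num_open_brackets += 1
--         elif char == ']':
--             num_open_brackets -= 1
--         elif char == ',' and num_open_brackets == 0:
--             comma_indices.append(i)
--
--     if len(comma_indices) == 0:
--         return [args]
--
--     to_return: list[str] = []
--     last_index = 0
--     for comma_index in comma_indices:
--         to_return.append(args[last_index: comma_index])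
--         last_index = comma_index + 1
--     to_return.append(args[last_index:])
--     return to_return
-- ===== SOURCE B (Python) =====
-- def _split_generic_arguments(args: str) -> list[str]:
--     """Split a generic's type arguments up (single pass, buffer-based)."""
--     parts: list[str] = []
--     cur: list[str] = []
--     depth = 0
--     for ch in args:
--         if ch == '[':
--             depth += 1
--             cur.append(ch)
--         elif ch == ']':
--             depth -= 1
--             cur.append(ch)
--         elif ch == ',' and depth == 0:
--             parts.append(''.join(cur))
--             cur = []
--         else:
--             cur.append(ch)
--     parts.append(''.join(cur))
--     return parts
-- ===== Notes on version B (the rewrite author's own statement) =====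
-- stated objective: simpler
-- what changed: Replaces A's two-phase algorithm (collect comma indices, then a second loop slicing the string by index pairs) with a single pass that accumulates the current piece in a character buffer and flushes it at each top-level comma, so no index list and no slicing exist at all.
import Mathlib
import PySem

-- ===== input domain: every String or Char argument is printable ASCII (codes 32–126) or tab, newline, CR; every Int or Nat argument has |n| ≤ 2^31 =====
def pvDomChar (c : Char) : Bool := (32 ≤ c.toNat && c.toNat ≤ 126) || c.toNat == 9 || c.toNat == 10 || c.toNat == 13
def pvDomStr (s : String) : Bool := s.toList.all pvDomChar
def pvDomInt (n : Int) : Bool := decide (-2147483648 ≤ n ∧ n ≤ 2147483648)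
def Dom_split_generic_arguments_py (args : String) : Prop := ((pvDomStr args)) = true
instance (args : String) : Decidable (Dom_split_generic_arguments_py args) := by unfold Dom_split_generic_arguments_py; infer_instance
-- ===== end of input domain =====

-- B replaces A's two-phase split (collect top-level comma indices, then slice between them)
-- by a single pass with a character buffer flushed at each top-level comma; same values, no speed claim.


-- ===== PORT A =====
def split_generic_arguments_py (args : String) : List String :=
  let cs := args.toList
  -- for i, char in enumerate(args): track num_open_brackets, collect comma_indices
  let scan := (PySem.List.enumerate cs 0).foldl
    (fun (st : Int × List Int) ic =>
      if ic.2 = '[' then (st.1 + 1, st.2)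
      else if ic.2 = ']' then (st.1 - 1, st.2)
      else if ic.2 = ',' ∧ st.1 = 0 then (st.1, st.2 ++ [ic.1])
      else st) (0, [])
  let commaIndices := scan.2
  if commaIndices.length = 0 then [args]
  else
    let fin := commaIndices.foldl
      (fun (st : List String × Int) ci =>
        (st.1 ++ [String.ofList (PySem.List.slice cs (some st.2) (some ci))], ci + 1))
      ([], 0)
    fin.1 ++ [String.ofList (PySem.List.slice cs (some fin.2) none)]

-- ===== PORT B =====
def split_generic_arguments_py_alt (args : String) : List String :=
  let fin := args.toList.foldl
    (fun (st : List String × List Char × Int) ch =>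
      if ch = '[' then (st.1, st.2.1 ++ [ch], st.2.2 + 1)
      else if ch = ']' then (st.1, st.2.1 ++ [ch], st.2.2 - 1)
      else if ch = ',' ∧ st.2.2 = 0 then (st.1 ++ [String.ofList st.2.1], [], st.2.2)
      else (st.1, st.2.1 ++ [ch], st.2.2)) ([], [], 0)
  fin.1 ++ [String.ofList fin.2.1]

-- ===== PRECONDITION & SPEC =====
def Spec_split_generic_arguments_py (args : String) (out : List String) : Prop := out = split_generic_arguments_py_alt args
instance (args : String) (out : List String) : Decidable (Spec_split_generic_arguments_py args out) := by unfold Spec_split_generic_arguments_py; infer_instance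

-- ===== CLAIM (what is proved, stated in full; the proofs are below) =====
def Claim_equal_split_generic_arguments_py : Prop := ∀ (args : String), Dom_split_generic_arguments_py args → Spec_split_generic_arguments_py args (split_generic_arguments_py args)

-- ===== LEMMAS AND PROOFS =====

/-- Spec of the split: first piece and remaining pieces, by recursion on the characters. -/
def pvF : List Char → Int → List Char × List (List Char)
  | [], _ => ([], [])
  | c :: cs, d =>
    if c = '[' then let p := pvF cs (d + 1); (c :: p.1, p.2)
    else if c = ']' then let p := pvF cs (d - 1); (c :: p.1, p.2)
    else if c = ',' ∧ d = 0 then let p := pvF cs d; ([], p.1 :: p.2)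
    else let p := pvF cs d; (c :: p.1, p.2)

/-- Spec of A's first loop: absolute indices of top-level commas, starting at index i, depth d. -/
def pvCI : List Char → Int → Int → List Int
  | [], _, _ => []
  | c :: cs, d, i =>
    if c = '[' then pvCI cs (d + 1) (i + 1)
    else if c = ']' then pvCI cs (d - 1) (i + 1)
    else if c = ',' ∧ d = 0 then i :: pvCI cs d (i + 1)
    else pvCI cs d (i + 1)

/-- Spec of A's slicing phase: (first piece, rest) cut at the given indices. -/
def pvSL (full : List Char) : Int → List Int → List Char × List (List Char)
  | last, [] => (PySem.List.slice full (some last) none, [])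
  | last, i :: l =>
    let p := pvSL full (i + 1) l
    (PySem.List.slice full (some last) (some i), p.1 :: p.2)

theorem pvCI_ge : ∀ (cs : List Char) (d i : Int), ∀ x ∈ pvCI cs d i, i ≤ x := by
  intro cs
  induction cs with
  | nil => intro d i x hx; simp [pvCI] at hx
  | cons c cs ih =>
    intro d i x hx
    simp only [pvCI] at hx
    split_ifs at hx with h1 h2 h3
    · exact le_trans (by omega) (ih _ _ x hx)
    · exact le_trans (by omega) (ih _ _ x hx)
    · rcases List.mem_cons.mp hx with rfl | hx
      · exact le_refl x
      · exact le_trans (by omega) (ih _ _ x hx)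
    · exact le_trans (by omega) (ih _ _ x hx)

theorem pvScan_eq : ∀ (cs : List Char) (d : Int) (acc : List Int) (s : Int),
    ((PySem.List.enumerate cs s).foldl
      (fun (st : Int × List Int) ic =>
        if ic.2 = '[' then (st.1 + 1, st.2)
        else if ic.2 = ']' then (st.1 - 1, st.2)
        else if ic.2 = ',' ∧ st.1 = 0 then (st.1, st.2 ++ [ic.1])
        else st) (d, acc)).2 = acc ++ pvCI cs d s := by
  intro cs
  induction cs with
  | nil => intro d acc s; simp [PySem.List.enumerate_nil, pvCI]
  | cons c cs ih =>
    intro d acc s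
    rw [PySem.List.enumerate_cons]
    simp only [List.foldl_cons, pvCI]
    by_cases h1 : c = '['
    · simp [h1, ih]
    · by_cases h2 : c = ']'
      · simp [h2, ih]
      · by_cases h3 : c = ',' ∧ d = 0
        · obtain ⟨hc, hd⟩ := h3
          simp [hc, hd, ih]
        · simp [h1, h2, h3, ih]

theorem pvSlice_fold_eq (full : List Char) : ∀ (l : List Int) (acc : List String) (last : Int),
    (let fin := l.foldl
      (fun (st : List String × Int) ci =>
        (st.1 ++ [String.ofList (PySem.List.slice full (some st.2) (some ci))], ci + 1))
      (acc, last)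
     fin.1 ++ [String.ofList (PySem.List.slice full (some fin.2) none)])
    = acc ++ ((pvSL full last l).1 :: (pvSL full last l).2).map String.ofList := by
  intro l
  induction l with
  | nil => intro acc last; simp [pvSL]
  | cons i l ih =>
    intro acc last
    simp only [List.foldl_cons, pvSL]
    rw [ih]
    simp

theorem pvB_fold_eq : ∀ (cs : List Char) (parts : List String) (cur : List Char) (d : Int),
    (let fin := cs.foldl
      (fun (st : List String × List Char × Int) ch =>
        if ch = '[' then (st.1, st.2.1 ++ [ch], st.2.2 + 1)
        else if ch = ']' then (st.1, st.2.1 ++ [ch], st.2.2 - 1)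
        else if ch = ',' ∧ st.2.2 = 0 then (st.1 ++ [String.ofList st.2.1], [], st.2.2)
        else (st.1, st.2.1 ++ [ch], st.2.2)) (parts, cur, d)
     fin.1 ++ [String.ofList fin.2.1])
    = parts ++ ((cur ++ (pvF cs d).1) :: (pvF cs d).2).map String.ofList := by
  intro cs
  induction cs with
  | nil => intro parts cur d; simp [pvF]
  | cons c cs ih =>
    intro parts cur d
    simp only [List.foldl_cons, pvF]
    by_cases h1 : c = '['
    · simp [h1, ih]
    · by_cases h2 : c = ']'
      · simp [h2, ih]
      · by_cases h3 : c = ',' ∧ d = 0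
        · obtain ⟨hc, hd⟩ := h3
          simp [hc, hd, ih]
        · simp [h1, h2, h3, ih]

/-- Prepending the character at position `pre.length` to the first slice. -/
theorem pvSL_shift (pre : List Char) (c : Char) (rest : List Char) (l : List Int)
    (hl : ∀ x ∈ l, (pre.length : Int) + 1 ≤ x) :
    pvSL (pre ++ c :: rest) (pre.length : Int) l
      = (c :: (pvSL (pre ++ c :: rest) ((pre.length : Int) + 1) l).1,
         (pvSL (pre ++ c :: rest) ((pre.length : Int) + 1) l).2) := by
  have hcast : ((pre.length : Int) + 1) = ((pre.length + 1 : Nat) : Int) := by push_cast; ring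
  cases l with
  | nil =>
    simp only [pvSL, hcast, PySem.List.slice_from_natCast]
    rw [show pre ++ c :: rest = (pre ++ [c]) ++ rest by simp] at *
    rw [show pre.length + 1 = (pre ++ [c]).length by simp, List.drop_left]
    rw [show (pre ++ [c]) ++ rest = pre ++ (c :: rest) by simp, List.drop_left]
  | cons i l =>
    have hi : (pre.length : Int) + 1 ≤ i := hl i (by simp)
    have h0 : (0 : Int) ≤ (pre.length : Int) := by positivity
    simp only [pvSL]
    refine Prod.ext ?_ rfl
    rw [PySem.List.slice_toNat _ h0 (by omega), PySem.List.slice_toNat _ (by omega) (by omega)]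
    have h1 : ((pre.length : Int)).toNat = pre.length := by omega
    have h2 : ((pre.length : Int) + 1).toNat = pre.length + 1 := by omega
    rw [h1, h2]
    have hdrop : (pre ++ c :: rest).drop pre.length = c :: rest := List.drop_left
    have hdrop1 : (pre ++ c :: rest).drop (pre.length + 1) = rest := by
      have : pre ++ c :: rest = (pre ++ [c]) ++ rest := by simp
      rw [this]
      have : pre.length + 1 = (pre ++ [c]).length := by simp
      rw [this, List.drop_left]
    rw [hdrop, hdrop1]
    have h3 : i.toNat - pre.length = (i.toNat - (pre.length + 1)) + 1 := by omega
    rw [h3, List.take_succ_cons]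

/-- Slicing the full string at the comma indices of the suffix yields the spec split. -/
theorem pvSL_CI : ∀ (cs : List Char) (d : Int) (pre : List Char),
    pvSL (pre ++ cs) (pre.length : Int) (pvCI cs d (pre.length : Int)) = pvF cs d := by
  intro cs
  induction cs with
  | nil =>
    intro d pre
    simp [pvCI, pvSL, pvF, PySem.List.slice_from_natCast]
  | cons c cs ih =>
    intro d pre
    have hfull : pre ++ c :: cs = (pre ++ [c]) ++ cs := by simp
    have hlen : ((pre ++ [c]).length : Int) = (pre.length : Int) + 1 := by simp
    have ihc : ∀ d', pvSL (pre ++ c :: cs) ((pre.length : Int) + 1)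
        (pvCI cs d' ((pre.length : Int) + 1)) = pvF cs d' := by
      intro d'
      have := ih d' (pre ++ [c])
      rw [hlen] at this
      rw [← hfull] at this
      exact this
    have hge : ∀ d', ∀ x ∈ pvCI cs d' ((pre.length : Int) + 1), (pre.length : Int) + 1 ≤ x :=
      fun d' => pvCI_ge cs d' _
    simp only [pvCI, pvF]
    split_ifs with h1 h2 h3
    · rw [pvSL_shift pre c cs _ (hge (d + 1)), ihc (d + 1)]
    · rw [pvSL_shift pre c cs _ (hge (d - 1)), ihc (d - 1)]
    · -- top-level comma at index pre.length
      simp only [pvSL]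
      have hnn : PySem.List.slice (pre ++ c :: cs) (some (pre.length : Int))
          (some (pre.length : Int)) = [] := by
        rw [PySem.List.slice_toNat _ (by positivity) (by positivity)]
        simp
      rw [hnn, ihc d]
    · rw [pvSL_shift pre c cs _ (hge d), ihc d]

-- ===== VERDICT (by name: the statement is the Claim_ definition above) =====
theorem split_generic_arguments_py_spec : Claim_equal_split_generic_arguments_py := by
  intro args _
  unfold Spec_split_generic_arguments_py split_generic_arguments_py split_generic_arguments_py_alt
  simp only []
  rw [pvB_fold_eq args.toList [] [] 0]
  rw [pvScan_eq args.toList 0 [] 0]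
  have hmain : pvSL args.toList 0 (pvCI args.toList 0 0) = pvF args.toList 0 := by
    have := pvSL_CI args.toList 0 []
    simpa using this
  by_cases hempty : (pvCI args.toList 0 0).length = 0
  · have hnil : pvCI args.toList 0 0 = [] := List.length_eq_zero_iff.mp hempty
    rw [hnil] at hmain
    simp only [hnil, List.nil_append, List.length_nil]
    rw [← hmain]
    simp [pvSL, PySem.List.slice_from]
  · simp only [List.nil_append, if_neg hempty]
    rw [pvSlice_fold_eq args.toList (pvCI args.toList 0 0) [] 0]
    rw [hmain]
    simp
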